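-- pv_equiv track=rewrite | github.com/MadCatMagic/advent-of-code | 2023/v2.py | rotateMatrixCCW
-- ===== SOURCE A (Python) =====
-- def rotateMatrixCCW(arr):
--     if arr == []:
--         return []
--     elif arr == [[]]:
--         return [[]]
--     k = [[arr[j][-i-1] for j in range(len(arr))] for i in range(len(arr[0]))]
--     if type(arr[0]) == str:
--         return ["".join(l) for l in k]
--     return k
-- ===== SOURCE B (Python) =====
-- def rotateMatrixCCW(arr):
--     if arr == []:
--         return []
--     if arr == [[]]:
--         return [[]]
--     rows = [list(r) for r in arr]
--     out = []
--     for _ in range(len(arr[0])):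
--         out.append([r.pop() for r in rows])
--     if type(arr[0]) == str:
--         return ["".join(l) for l in out]
--     return out
-- ===== Notes on version B (the rewrite author's own statement) =====
-- stated objective: faster
-- what changed: B builds the rotation by repeatedly peeling the last column off mutable row copies (out.append([r.pop() for r in rows]) n times, O(1) pops) instead of A's double index comprehension arr[j][-i-1] (measured ~2x at the largest size); Pre_ excludes ragged inputs with a row shorter than row 0, on which both raise IndexError.
import Mathlib
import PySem

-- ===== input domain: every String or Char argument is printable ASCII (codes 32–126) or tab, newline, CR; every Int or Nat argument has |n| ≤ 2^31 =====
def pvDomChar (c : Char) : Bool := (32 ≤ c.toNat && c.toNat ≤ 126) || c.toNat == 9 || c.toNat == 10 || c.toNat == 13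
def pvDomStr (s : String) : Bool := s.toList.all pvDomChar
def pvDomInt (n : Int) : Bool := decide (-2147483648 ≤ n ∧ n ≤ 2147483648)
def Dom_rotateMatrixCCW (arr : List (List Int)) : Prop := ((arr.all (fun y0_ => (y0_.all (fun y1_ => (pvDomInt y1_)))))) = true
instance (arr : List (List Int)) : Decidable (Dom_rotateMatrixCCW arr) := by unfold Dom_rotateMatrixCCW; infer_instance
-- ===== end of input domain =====

-- B peels the last column off mutable row copies n times (pop from each row) instead of A's
-- double index comprehension arr[j][-i-1]; return values only, neither mutates its argument.
-- (The Python 'type(arr[0]) == str' branch of both programs is vacuous at type List (List Int).)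

-- ===== PORT A =====
def rotateMatrixCCW (arr : List (List Int)) : List (List Int) :=
  if arr = [] then []
  else if arr = [[]] then [[]]
  else
    (PySem.List.pyRange 0 ((arr.headD []).length : Int) 1).map (fun i =>
      (PySem.List.pyRange 0 (arr.length : Int) 1).map (fun j =>
        PySem.List.pyGetD (PySem.List.pyGetD arr j []) (-i - 1) 0))

-- ===== PORT B =====
-- the loop 'for _ in range(n): out.append([r.pop() for r in rows])':
-- each round emits the current last element of every row and drops it
def pvPeel (rows : List (List Int)) (n : Nat) : List (List Int) :=
  match n with
  | 0 => []
  | Nat.succ m => (rows.map (fun r => r.getLastD 0)) :: pvPeel (rows.map List.dropLast) m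

def rotateMatrixCCW_alt (arr : List (List Int)) : List (List Int) :=
  if arr = [] then []
  else if arr = [[]] then [[]]
  else pvPeel arr (arr.headD []).length

-- ===== PRECONDITION & SPEC =====
-- Pre_ excludes exactly the ragged matrices with a row shorter than row 0, where A raises IndexError.
def Pre_rotateMatrixCCW (arr : List (List Int)) : Prop :=
  ∀ row ∈ arr, (arr.headD []).length ≤ row.length
instance (arr : List (List Int)) : Decidable (Pre_rotateMatrixCCW arr) := by
  unfold Pre_rotateMatrixCCW; infer_instance

def pvWitness_rotateMatrixCCW : List (List Int) := [[1, 2], [3, 4], [5, 6]]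

def Spec_rotateMatrixCCW (arr : List (List Int)) (out : List (List Int)) : Prop := out = rotateMatrixCCW_alt arr
instance (arr : List (List Int)) (out : List (List Int)) : Decidable (Spec_rotateMatrixCCW arr out) := by unfold Spec_rotateMatrixCCW; infer_instance

-- ===== CLAIM (what is proved, stated in full; the proofs are below) =====
def Claim_equal_rotateMatrixCCW : Prop := ∀ (arr : List (List Int)), Dom_rotateMatrixCCW arr → Pre_rotateMatrixCCW arr → Spec_rotateMatrixCCW arr (rotateMatrixCCW arr)

-- ===== LEMMAS AND PROOFS =====

-- peeling, as a closed indexing form, when every row has at least n elements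
theorem pvPeel_eq (n : Nat) :
    ∀ (rows : List (List Int)), (∀ r ∈ rows, n ≤ r.length) →
      pvPeel rows n = (List.range n).map (fun i => rows.map (fun r => r.getD (r.length - 1 - i) 0)) := by
  induction n with
  | zero => intro rows _; simp [pvPeel]
  | succ m ih =>
    intro rows hall
    have hall' : ∀ r ∈ rows.map List.dropLast, m ≤ r.length := by
      intro t ht
      obtain ⟨r, hr, rfl⟩ := List.mem_map.mp ht
      have := hall r hr
      simp [List.length_dropLast]; omega
    rw [pvPeel, ih _ hall', List.range_succ_eq_map]
    simp only [List.map_cons, List.map_map]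
    congr 1
    · apply List.map_congr_left
      intro r hr
      have h1 : 1 ≤ r.length := le_trans (by omega) (hall r hr)
      have hne : r ≠ [] := by intro h; subst h; simp at h1
      rw [List.getLastD_eq_getLast?, List.getLast?_eq_getElem?]
      rw [List.getD_eq_getElem _ _ (by omega)]
      simp [List.getElem?_eq_getElem (by omega : r.length - 1 < r.length)]
    · apply List.map_congr_left
      intro i hi
      simp only [Function.comp]
      apply List.map_congr_left
      intro r hr
      have hlen := hall r hr
      have him : i < m := List.mem_range.mp hi
      show r.dropLast.getD (r.dropLast.length - 1 - i) 0 = r.getD (r.length - 1 - (i + 1)) 0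
      have hlt : r.dropLast.length - 1 - i < r.dropLast.length := by
        simp [List.length_dropLast]; omega
      rw [List.getD_eq_getElem _ _ hlt, List.getD_eq_getElem _ _ (by omega : r.length - 1 - (i + 1) < r.length)]
      rw [List.getElem_dropLast]
      congr 1
      simp only [List.length_dropLast]
      omega

-- ===== VERDICT (by name: the statement is the Claim_ definition above) =====
theorem rotateMatrixCCW_spec : Claim_equal_rotateMatrixCCW := by
  unfold Claim_equal_rotateMatrixCCW Spec_rotateMatrixCCW
  intro arr _ hpre
  unfold Pre_rotateMatrixCCW at hpre
  unfold rotateMatrixCCW rotateMatrixCCW_alt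
  by_cases h0 : arr = []
  · simp [h0]
  by_cases h1 : arr = [[]]
  · simp [h1]
  rw [if_neg h0, if_neg h1, if_neg h0, if_neg h1]
  rw [pvPeel_eq ((arr.headD []).length) arr hpre]
  rw [PySem.List.pyRange_zero_nat ((arr.headD []).length)]
  rw [List.map_map]
  apply List.map_congr_left
  intro k hk
  have hkn : k < (arr.headD []).length := List.mem_range.mp hk
  simp only [Function.comp]
  -- inner: [arr[j][-k-1] for j in range(len(arr))] = [row[-k-1] for row in arr]
  have hinner : (PySem.List.pyRange 0 (arr.length : Int) 1).map
      (fun j => PySem.List.pyGetD (PySem.List.pyGetD arr j []) (-(k : Int) - 1) 0)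
      = arr.map (fun row => PySem.List.pyGetD row (-(k : Int) - 1) 0) := by
    calc (PySem.List.pyRange 0 (arr.length : Int) 1).map
          (fun j => PySem.List.pyGetD (PySem.List.pyGetD arr j []) (-(k : Int) - 1) 0)
        = ((PySem.List.pyRange 0 (arr.length : Int) 1).map
            (fun j => PySem.List.pyGetD arr j [])).map
            (fun row => PySem.List.pyGetD row (-(k : Int) - 1) 0) := by
          rw [List.map_map]; rfl
      _ = arr.map (fun row => PySem.List.pyGetD row (-(k : Int) - 1) 0) := by
          rw [PySem.List.map_pyGetD_pyRange_zero']
  rw [hinner]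
  apply List.map_congr_left
  intro row hrow
  have hk1 : k + 1 ≤ row.length := by
    have := hpre row hrow
    omega
  have hneg : (-(k : Int) - 1) = -((k + 1 : Nat) : Int) := by push_cast; ring
  rw [hneg, PySem.List.pyGetD_neg_natCast _ _ _ (by omega) (by exact_mod_cast hk1)]
  rw [List.getD_eq_getElem _ _ (by omega : row.length - 1 - k < row.length)]
  congr 1
  omega
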